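-- pv_equiv track=rewrite | github.com/tristenkurutz/bird-scholar | main_a.py | is_relevant_paper
-- ===== SOURCE A (Python) =====
-- def is_relevant_paper(p):
--     same_sex_keywords = [
--         "same-sex", "same sex", "same‐sex",
--         "homosexual", "homosexuality",
--         "female-female", "male-male",
--         "female female", "male male",
--         "sexual behavior", "sexual behaviour",
--         "mating", "pair bond", "copulate",
--         "courtship", "mounting", "pairing",
--         "sexual partner", "sex partner",
--         "reproductive behavior", "reproductive behaviour"
--     ]
--
--     bird_keywords = [
--         "bird", "birds", "avian", "aves",
--         "songbird", "passerine", "ornithology",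
--         "finch", "sparrow", "warbler", "thrush",
--         "starling", "crane", "parrot", "owl",
--         "duck", "goose", "flamingo", "kestrel",
--         "corvid", "jay", "wren", "swift",
--         "macaw", "dove", "pigeon", "raptor",
--         "seabird", "shorebird", "waterfowl",
--         "budgerigar", "canary", "zebra finch",
--         "quail", "chicken", "poultry"
--     ]
--
--     title = p.get("title", "").lower()
--     abstract = (p.get("abstract") or "").lower()
--     full_text = title + " " + abstract
--
--     has_bird = any(kw in full_text for kw in bird_keywords)
--
--     if not abstract:
--         return has_bird and any(kw in title for kw in same_sex_keywords)
--
--     has_same_sex = any(kw in full_text for kw in same_sex_keywords)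
--     return has_bird and has_same_sex
-- ===== SOURCE B (Python) =====
-- SAME_SEX_KEYWORDS = [
--     "same-sex", "same sex", "same\u2010sex",
--     "homosexual", "homosexuality",
--     "female-female", "male-male",
--     "female female", "male male",
--     "sexual behavior", "sexual behaviour",
--     "mating", "pair bond", "copulate",
--     "courtship", "mounting", "pairing",
--     "sexual partner", "sex partner",
--     "reproductive behavior", "reproductive behaviour",
-- ]
--
-- BIRD_KEYWORDS = [
--     "bird", "birds", "avian", "aves",
--     "songbird", "passerine", "ornithology",
--     "finch", "sparrow", "warbler", "thrush",
--     "starling", "crane", "parrot", "owl",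
--     "duck", "goose", "flamingo", "kestrel",
--     "corvid", "jay", "wren", "swift",
--     "macaw", "dove", "pigeon", "raptor",
--     "seabird", "shorebird", "waterfowl",
--     "budgerigar", "canary", "zebra finch",
--     "quail", "chicken", "poultry",
-- ]
--
-- # hash index: the keywords as a set, plus the set of keyword lengths,
-- # so one sliding-window pass with O(1) lookups replaces the per-keyword scans
-- _SS_SET = frozenset(SAME_SEX_KEYWORDS)
-- _SS_LENS = {len(k) for k in SAME_SEX_KEYWORDS}
-- _BIRD_SET = frozenset(BIRD_KEYWORDS)
-- _BIRD_LENS = {len(k) for k in BIRD_KEYWORDS}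
--
--
-- def _contains_any(text, kwset, lengths):
--     # slide a window over every start position; a window content that hashes
--     # into the keyword set means some keyword occurs as a substring
--     for i in range(len(text) + 1):
--         for n in lengths:
--             if text[i:i + n] in kwset:
--                 return True
--     return False
--
--
-- def is_relevant_paper(p):
--     title = p.get("title", "").lower()
--     abstract = (p.get("abstract") or "").lower()
--     full_text = title + " " + abstract
--
--     has_bird = _contains_any(full_text, _BIRD_SET, _BIRD_LENS)
--
--     if not abstract:
--         return has_bird and _contains_any(title, _SS_SET, _SS_LENS)
--
--     return has_bird and _contains_any(full_text, _SS_SET, _SS_LENS)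
-- ===== Notes on version B (the rewrite author's own statement) =====
-- stated objective: alternative
-- what changed: Relevance is decided by a sliding-window pass over the text: the keywords are indexed once as a hash set keyed alongside the set of keyword lengths, and every window text[i:i+n] is looked up in the set, so the per-keyword any(kw in text) substring scans disappear.
import Mathlib
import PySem

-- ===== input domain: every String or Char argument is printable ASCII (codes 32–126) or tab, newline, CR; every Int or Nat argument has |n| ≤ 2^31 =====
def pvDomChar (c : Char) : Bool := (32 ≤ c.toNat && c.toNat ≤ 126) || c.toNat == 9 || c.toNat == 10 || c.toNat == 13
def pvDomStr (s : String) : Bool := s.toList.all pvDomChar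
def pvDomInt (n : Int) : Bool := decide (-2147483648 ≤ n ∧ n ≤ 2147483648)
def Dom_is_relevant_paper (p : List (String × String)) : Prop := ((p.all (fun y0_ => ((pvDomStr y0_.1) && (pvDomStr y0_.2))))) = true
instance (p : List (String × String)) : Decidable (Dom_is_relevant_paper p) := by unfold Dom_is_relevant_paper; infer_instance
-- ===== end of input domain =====

-- B indexes the keywords as a hash set plus the set of their lengths and decides relevance by a
-- sliding-window pass with set lookups instead of one substring scan per keyword (alternative).


-- shared keyword data (module constants in both sources; identical literals)
def same_sex_keywords : List String :=
  ["same-sex", "same sex", "same‐sex",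
   "homosexual", "homosexuality",
   "female-female", "male-male",
   "female female", "male male",
   "sexual behavior", "sexual behaviour",
   "mating", "pair bond", "copulate",
   "courtship", "mounting", "pairing",
   "sexual partner", "sex partner",
   "reproductive behavior", "reproductive behaviour"]

def bird_keywords : List String :=
  ["bird", "birds", "avian", "aves",
   "songbird", "passerine", "ornithology",
   "finch", "sparrow", "warbler", "thrush",
   "starling", "crane", "parrot", "owl",
   "duck", "goose", "flamingo", "kestrel",
   "corvid", "jay", "wren", "swift",
   "macaw", "dove", "pigeon", "raptor",
   "seabird", "shorebird", "waterfowl",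
   "budgerigar", "canary", "zebra finch",
   "quail", "chicken", "poultry"]

-- ===== PORT A =====
-- 'kw in text' is PySem.Chars.isIn on the lowered char lists; 'x or ""' on an optional string is getD "".
def is_relevant_paper (p : List (String × String)) : Bool :=
  let d := PySem.Dict.mk p
  let title := PySem.Chars.lower (d.getD "title" "").toList
  let abstract := PySem.Chars.lower ((d.get? "abstract").getD "").toList
  let full_text := title ++ ' ' :: abstract
  let has_bird := bird_keywords.any (fun kw => PySem.Chars.isIn kw.toList full_text)
  if abstract.isEmpty then
    has_bird && same_sex_keywords.any (fun kw => PySem.Chars.isIn kw.toList title)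
  else
    has_bird && same_sex_keywords.any (fun kw => PySem.Chars.isIn kw.toList full_text)

-- ===== PORT B =====
-- Source B's sliding window: 'for i in range(len(text)+1)' walks the suffixes text.drop i (including
-- the empty one), and text[i:i+n] is (text.drop i).take n; the frozenset lookup is membership in
-- the keyword set.  Ported as structural recursion on the suffix.
def containsAny (kwset : PySem.Set (List Char)) (lengths : PySem.Set Nat) : List Char → Bool
  | [] => lengths.any (fun n => PySem.Set.contains kwset (([] : List Char).take n))
  | c :: rest =>
      lengths.any (fun n => PySem.Set.contains kwset ((c :: rest).take n)) ||
      containsAny kwset lengths rest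

def ss_set : PySem.Set (List Char) := PySem.Set.ofList (same_sex_keywords.map String.toList)
def ss_lens : PySem.Set Nat := PySem.Set.ofList (same_sex_keywords.map (fun k => k.toList.length))
def bird_set : PySem.Set (List Char) := PySem.Set.ofList (bird_keywords.map String.toList)
def bird_lens : PySem.Set Nat := PySem.Set.ofList (bird_keywords.map (fun k => k.toList.length))

def is_relevant_paper_alt (p : List (String × String)) : Bool :=
  let d := PySem.Dict.mk p
  let title := PySem.Chars.lower (d.getD "title" "").toList
  let abstract := PySem.Chars.lower ((d.get? "abstract").getD "").toList
  let full_text := title ++ ' ' :: abstract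
  let has_bird := containsAny bird_set bird_lens full_text
  if abstract.isEmpty then
    has_bird && containsAny ss_set ss_lens title
  else
    has_bird && containsAny ss_set ss_lens full_text

-- ===== PRECONDITION & SPEC =====
def Spec_is_relevant_paper (p : List (String × String)) (out : Bool) : Prop := out = is_relevant_paper_alt p
instance (p : List (String × String)) (out : Bool) : Decidable (Spec_is_relevant_paper p out) := by unfold Spec_is_relevant_paper; infer_instance

-- ===== CLAIM (what is proved, stated in full; the proofs are below) =====
def Claim_equal_is_relevant_paper : Prop := ∀ (p : List (String × String)), Dom_is_relevant_paper p → Spec_is_relevant_paper p (is_relevant_paper p)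

-- ===== LEMMAS AND PROOFS =====

-- the sliding-window lookup succeeds iff some admissible-length window equals a set element
theorem containsAny_true_iff (kwset : PySem.Set (List Char)) (lengths : PySem.Set Nat)
    (s : List Char) :
    containsAny kwset lengths s = true ↔
      ∃ j n, n ∈ lengths ∧ (s.drop j).take n ∈ kwset := by
  induction s with
  | nil =>
      simp only [containsAny, List.any_eq_true, PySem.Set.contains]
      constructor
      · rintro ⟨n, hn, hm⟩; exact ⟨0, n, hn, by simpa using hm⟩
      · rintro ⟨j, n, hn, hm⟩
        exact ⟨n, hn, by simpa [List.drop_nil] using hm⟩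
  | cons c rest ih =>
      simp only [containsAny, Bool.or_eq_true, List.any_eq_true, PySem.Set.contains, ih]
      constructor
      · rintro (⟨n, hn, hm⟩ | ⟨j, n, hn, hm⟩)
        · exact ⟨0, n, hn, by simpa using hm⟩
        · exact ⟨j + 1, n, hn, hm⟩
      · rintro ⟨j, n, hn, hm⟩
        cases j with
        | zero => exact Or.inl ⟨n, hn, by simpa using hm⟩
        | succ j => exact Or.inr ⟨j, n, hn, hm⟩

-- over the keyword index built from kws, the window pass equals the per-keyword substring scan
theorem containsAny_eq_any (kws : List String) (s : List Char) :
    containsAny (PySem.Set.ofList (kws.map String.toList))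
        (PySem.Set.ofList (kws.map (fun k => k.toList.length))) s
      = kws.any (fun kw => PySem.Chars.isIn kw.toList s) := by
  rw [Bool.eq_iff_iff, containsAny_true_iff]
  simp only [List.any_eq_true, PySem.Set.mem_ofList, List.mem_map]
  constructor
  · rintro ⟨j, n, -, w, hw, hweq⟩
    refine ⟨w, hw, (PySem.Chars.exists_prefix_drop_iff_isIn _ _).mp ⟨j, ?_⟩⟩
    rw [hweq]; exact List.take_prefix _ _
  · rintro ⟨w, hw, h⟩
    obtain ⟨j, hj⟩ := (PySem.Chars.exists_prefix_drop_iff_isIn _ _).mpr h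
    exact ⟨j, w.toList.length, ⟨w, hw, rfl⟩, w, hw, (List.prefix_iff_eq_take.mp hj)⟩

-- ===== VERDICT (by name: the statement is the Claim_ definition above) =====
theorem is_relevant_paper_spec : Claim_equal_is_relevant_paper := by
  intro p _
  unfold Spec_is_relevant_paper is_relevant_paper is_relevant_paper_alt
  simp only [ss_set, ss_lens, bird_set, bird_lens, containsAny_eq_any]
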